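-- pv_equiv track=rewrite | github.com/jcheng335/versereferencesnew | bible-outline-enhanced-backend/src/utils/enhanced_verse_parser.py | _compress_verse_list
-- ===== SOURCE A (Python) =====
-- from typing import List, Dict, Tuple, Optional
--
-- def _compress_verse_list(verses: List[int]) -> str:
--     """Compress a list of verses into ranges where possible"""
--     if not verses:
--         return ""
--
--     verses = sorted(set(verses))
--     ranges = []
--     start = verses[0]
--     end = verses[0]
--
--     for i in range(1, len(verses)):
--         if verses[i] == end + 1:
--             end = verses[i]
--         else:
--             if start == end:
--                 ranges.append(str(start))
--             else:
--                 ranges.append(f"{start}-{end}")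
--             start = end = verses[i]
--
--     # Add the last range
--     if start == end:
--         ranges.append(str(start))
--     else:
--         ranges.append(f"{start}-{end}")
--
--     return ', '.join(ranges)
-- ===== SOURCE B (Python) =====
-- from typing import List
--
--
-- def _compress_verse_list(verses: List[int]) -> str:
--     """Compress a list of verses into ranges where possible."""
--     if not verses:
--         return ""
--
--     # Classify each distinct verse independently by set membership:
--     # v opens a maximal consecutive run iff v-1 is absent, closes one iff v+1 is absent.
--     vset = set(verses)
--     starts = sorted(v for v in vset if v - 1 not in vset)
--     ends = sorted(v for v in vset if v + 1 not in vset)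
--
--     # Runs are disjoint intervals, so the i-th smallest start pairs with the i-th smallest end.
--     return ', '.join(str(a) if a == b else f"{a}-{b}" for a, b in zip(starts, ends))
-- ===== Notes on version B (the rewrite author's own statement) =====
-- stated objective: alternative
-- what changed: B classifies each distinct verse independently by set membership (a verse opens a maximal run iff v-1 is absent, closes one iff v+1 is absent) and zips the sorted start list with the sorted end list, instead of A's sorted sweep threading a running start/end accumulator that flushes a range at every break.
import Mathlib
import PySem

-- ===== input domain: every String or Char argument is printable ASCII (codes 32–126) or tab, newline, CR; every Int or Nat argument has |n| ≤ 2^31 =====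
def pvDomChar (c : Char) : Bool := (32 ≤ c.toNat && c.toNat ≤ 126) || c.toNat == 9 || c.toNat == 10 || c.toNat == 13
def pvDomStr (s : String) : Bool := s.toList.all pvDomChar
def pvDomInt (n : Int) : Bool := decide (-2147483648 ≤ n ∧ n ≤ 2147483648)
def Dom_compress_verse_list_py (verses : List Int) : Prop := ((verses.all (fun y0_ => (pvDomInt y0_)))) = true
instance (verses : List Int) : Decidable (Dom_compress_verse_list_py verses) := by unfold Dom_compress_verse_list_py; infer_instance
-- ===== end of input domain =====

-- B classifies each distinct verse by set membership as a run start (v-1 absent) / run end (v+1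
-- absent) and zips the sorted starts with the sorted ends, instead of A's sorted sweep with a
-- running start/end accumulator (objective: alternative; same cost). Return values agree everywhere.


-- ===== PORT A =====
-- one loop step of A: i-th index, state (ranges, start, end)
def aStep (vs : List Int) (st : List String × Int × Int) (i : Int) : List String × Int × Int :=
  let vi := PySem.List.pyGetD vs i 0
  if vi = st.2.2 + 1 then (st.1, st.2.1, vi)
  else (st.1 ++ [if st.2.1 = st.2.2 then PySem.Int.toStr st.2.1
                 else PySem.Int.toStr st.2.1 ++ "-" ++ PySem.Int.toStr st.2.2], vi, vi)

def compress_verse_list_py (verses : List Int) : String :=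
  if verses = [] then ""
  else
    let vs := PySem.List.sorted (PySem.Set.ofList verses) (fun x => x)
    let s0 := PySem.List.pyGetD vs 0 0
    let res := (PySem.List.pyRange 1 (vs.length : Int) 1).foldl (aStep vs) ([], s0, s0)
    PySem.Str.join ", "
      (res.1 ++ [if res.2.1 = res.2.2 then PySem.Int.toStr res.2.1
                 else PySem.Int.toStr res.2.1 ++ "-" ++ PySem.Int.toStr res.2.2])

-- ===== PORT B =====
-- str(a) if a == b else f"{a}-{b}" for one (start, end) pair
def bFmt (p : Int × Int) : String :=
  if p.1 = p.2 then PySem.Int.toStr p.1 else PySem.Int.toStr p.1 ++ "-" ++ PySem.Int.toStr p.2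

def compress_verse_list_py_alt (verses : List Int) : String :=
  if verses = [] then ""
  else
    let vset := PySem.Set.ofList verses
    let starts := PySem.List.sorted (vset.filter (fun v => !(vset.contains (v - 1)))) (fun x => x)
    let ends := PySem.List.sorted (vset.filter (fun v => !(vset.contains (v + 1)))) (fun x => x)
    PySem.Str.join ", " ((starts.zip ends).map bFmt)

-- ===== PRECONDITION & SPEC =====
def Spec_compress_verse_list_py (verses : List Int) (out : String) : Prop := out = compress_verse_list_py_alt verses
instance (verses : List Int) (out : String) : Decidable (Spec_compress_verse_list_py verses out) := by unfold Spec_compress_verse_list_py; infer_instance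

-- ===== CLAIM (what is proved, stated in full; the proofs are below) =====
def Claim_equal_compress_verse_list_py : Prop := ∀ (verses : List Int), Dom_compress_verse_list_py verses → Spec_compress_verse_list_py verses (compress_verse_list_py verses)

-- ===== LEMMAS AND PROOFS =====

-- (start, end) pairs of the maximal consecutive runs of l, with (s, e) the run in progress
def runsSE (s e : Int) : List Int → List (Int × Int)
  | [] => [(s, e)]
  | v :: vt => if v = e + 1 then runsSE s v vt else (s, e) :: runsSE v v vt

-- A's loop step in value-passing form
def aF (st : List String × Int × Int) (v : Int) : List String × Int × Int :=
  if v = st.2.2 + 1 then (st.1, st.2.1, v) else (st.1 ++ [bFmt st.2], v, v)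

lemma aStep_eq (vs : List Int) :
    aStep vs = fun st i => aF st (PySem.List.pyGetD vs i 0) := by
  funext st i
  simp [aStep, aF, bFmt]

-- A's loop computes the formatted runs, flushing the final (start, end) after the fold
lemma aLoop_eq : ∀ (l : List Int) (acc : List String) (s e : Int),
    (l.foldl aF (acc, s, e)).1
      ++ [bFmt (l.foldl aF (acc, s, e)).2]
      = acc ++ (runsSE s e l).map bFmt := by
  intro l
  induction l with
  | nil => intro acc s e; simp [runsSE]
  | cons v vt ih =>
    intro acc s e
    by_cases h : v = e + 1
    · simp [aF, runsSE, h, ih]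
    · simp [aF, runsSE, h, ih]

-- on a strictly increasing list pre ++ e :: l, the firsts of the runs of l (run in progress (s, e))
-- are s followed by the elements of l whose predecessor is absent, and the lasts are the elements
-- of e :: l whose successor is absent
lemma runs_fst_snd (vs : List Int) : ∀ (l pre : List Int) (s e : Int),
    vs = pre ++ e :: l → vs.Pairwise (· < ·) →
    (runsSE s e l).map Prod.fst = s :: l.filter (fun v => !(vs.contains (v - 1)))
    ∧ (runsSE s e l).map Prod.snd = (e :: l).filter (fun v => !(vs.contains (v + 1))) := by
  intro l
  induction l with
  | nil =>
    intro pre s e hvs hpw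
    have he1 : ¬ (e + 1) ∈ vs := by
      intro hm
      rw [hvs] at hm hpw
      rcases List.mem_append.mp hm with hp | hc
      · have := (List.pairwise_append.mp hpw).2.2 _ hp (e + 1 - 1) (by simp)
        omega
      · rw [List.mem_singleton] at hc; omega
    exact ⟨by simp [runsSE], by simp [runsSE, he1]⟩
  | cons v vt ih =>
    intro pre s e hvs hpw
    have hvs' : vs = (pre ++ [e]) ++ v :: vt := by simp [hvs]
    have hpw' : (pre ++ e :: v :: vt).Pairwise (· < ·) := hvs ▸ hpw
    have hpre : ∀ x ∈ pre, x < e := fun x hx =>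
      (List.pairwise_append.mp hpw').2.2 x hx e (by simp)
    have hpc := (List.pairwise_append.mp hpw').2.1
    have hev : e < v := (List.pairwise_cons.mp hpc).1 v (by simp)
    have hvvt : ∀ x ∈ vt, v < x := (List.pairwise_cons.mp (List.pairwise_cons.mp hpc).2).1
    by_cases h : v = e + 1
    · subst h
      obtain ⟨ihf, ihs⟩ := ih (pre ++ [e]) s (e + 1) hvs' hpw
      have hvm : e ∈ vs := by rw [hvs]; simp
      have hem : ((e : Int) + 1) ∈ vs := by rw [hvs]; simp
      constructor
      · simp [runsSE, ihf, hvm]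
      · simp [runsSE, ihs, hem]
    · obtain ⟨ihf, ihs⟩ := ih (pre ++ [e]) v v hvs' hpw
      have hv1 : ¬ (v - 1) ∈ vs := by
        intro hm
        rw [hvs] at hm
        rcases List.mem_append.mp hm with hp | hc
        · have := hpre _ hp; omega
        · rcases List.mem_cons.mp hc with h1 | hc
          · omega
          · rcases List.mem_cons.mp hc with h2 | h3
            · omega
            · have := hvvt _ h3; omega
      have he1 : ¬ (e + 1) ∈ vs := by
        intro hm
        rw [hvs] at hm
        rcases List.mem_append.mp hm with hp | hc
        · have := hpre _ hp; omega
        · rcases List.mem_cons.mp hc with h1 | hc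
          · omega
          · rcases List.mem_cons.mp hc with h2 | h3
            · omega
            · have := hvvt _ h3; omega
      constructor
      · simp only [runsSE, if_neg h, List.map_cons, ihf, List.filter_cons]
        simp [hv1]
      · simp only [runsSE, if_neg h, List.map_cons, ihs]
        conv_rhs => rw [List.filter_cons]
        simp [he1]

-- zipping the firsts with the lasts recovers the pair list
lemma zip_fst_snd {α β : Type} : ∀ (l : List (α × β)),
    (l.map Prod.fst).zip (l.map Prod.snd) = l := by
  intro l
  induction l with
  | nil => rfl
  | cons p t ih => simp [ih]

-- sorting the filtered set = filtering the sorted set (identity key, distinct elements)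
lemma sorted_filter (xs : List Int) (p : Int → Bool) :
    PySem.List.sorted ((PySem.Set.ofList xs).filter p) (fun x => x)
      = (PySem.List.sorted (PySem.Set.ofList xs) (fun x => x)).filter p := by
  apply PySem.List.sorted_eq_of_perm_of_pairwise_lt
  · exact ((PySem.List.sorted_perm _ _ _).filter p)
  · exact List.Pairwise.sublist List.filter_sublist (PySem.List.sorted_ofList_pairwise_lt xs)

-- ===== VERDICT (by name: the statement is the Claim_ definition above) =====
theorem compress_verse_list_py_spec : Claim_equal_compress_verse_list_py := by
  intro verses _
  unfold Spec_compress_verse_list_py compress_verse_list_py compress_verse_list_py_alt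
  by_cases hv : verses = []
  · simp [hv]
  · simp only [hv, ite_false]
    set vs := PySem.List.sorted (PySem.Set.ofList verses) (fun x => x) with hvs
    have hpw : vs.Pairwise (· < ·) := PySem.List.sorted_ofList_pairwise_lt verses
    have hne : vs ≠ [] := by
      intro h
      obtain ⟨y, hy⟩ := List.exists_mem_of_ne_nil verses hv
      have : y ∈ vs := by
        rw [hvs, PySem.List.mem_sorted]
        exact (PySem.Set.mem_ofList verses y).mpr hy
      simp [h] at this
    obtain ⟨v0, vt, hcons⟩ := List.exists_cons_of_ne_nil hne
    -- A's side: the loop produces the formatted runs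
    have hA : (PySem.List.pyRange 1 (vs.length : Int) 1).foldl (aStep vs) ([], PySem.List.pyGetD vs 0 0, PySem.List.pyGetD vs 0 0)
        = vt.foldl aF ([], v0, v0) := by
      rw [aStep_eq vs]
      rw [PySem.List.foldl_pyRange_pyGetD' vs 0 aF _ (by norm_num)]
      simp [hcons, pysem]
    -- B's side: the two filters over the sorted set
    obtain ⟨hfst, hsnd⟩ := runs_fst_snd vs vt [] v0 v0 (by simp [hcons]) hpw
    have hv01 : ¬ (v0 - 1) ∈ vs := by
      intro hm
      rw [hcons] at hm hpw
      rcases List.mem_cons.mp hm with hc | hc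
      · omega
      · have := (List.pairwise_cons.mp hpw).1 _ hc; omega
    have hstarts : vs.filter (fun v => !(vs.contains (v - 1))) = (runsSE v0 v0 vt).map Prod.fst := by
      refine (congrArg (List.filter _) hcons).trans ?_
      rw [List.filter_cons]
      simp only [hfst]
      simp [hv01]
    have hends : vs.filter (fun v => !(vs.contains (v + 1))) = (runsSE v0 v0 vt).map Prod.snd := by
      exact (congrArg (List.filter _) hcons).trans hsnd.symm
    have hcontains : ∀ x : Int, ((PySem.Set.ofList verses).contains x) = (vs.contains x) := by
      intro x
      rw [Bool.eq_iff_iff]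
      simp only [List.contains_iff_mem]
      rw [hvs]
      simp [PySem.List.mem_sorted]
    have hfiltS : (PySem.Set.ofList verses).filter (fun v => !((PySem.Set.ofList verses).contains (v - 1)))
        = (PySem.Set.ofList verses).filter (fun v => !(vs.contains (v - 1))) :=
      List.filter_congr (fun x _ => by rw [hcontains])
    have hfiltE : (PySem.Set.ofList verses).filter (fun v => !((PySem.Set.ofList verses).contains (v + 1)))
        = (PySem.Set.ofList verses).filter (fun v => !(vs.contains (v + 1))) :=
      List.filter_congr (fun x _ => by rw [hcontains])
    have hB : ((PySem.List.sorted ((PySem.Set.ofList verses).filter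
                  (fun v => !((PySem.Set.ofList verses).contains (v - 1)))) (fun x => x)).zip
               (PySem.List.sorted ((PySem.Set.ofList verses).filter
                  (fun v => !((PySem.Set.ofList verses).contains (v + 1)))) (fun x => x)))
        = runsSE v0 v0 vt := by
      rw [hfiltS, hfiltE, sorted_filter, sorted_filter, ← hvs, hstarts, hends, zip_fst_snd]
    rw [hA, hB]
    have hAside := aLoop_eq vt [] v0 v0
    simp only [List.nil_append] at hAside
    have hfin : PySem.Str.join ", " ((vt.foldl aF ([], v0, v0)).1 ++ [bFmt (vt.foldl aF ([], v0, v0)).2])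
        = PySem.Str.join ", " ((runsSE v0 v0 vt).map bFmt) := by rw [hAside]
    exact hfin
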